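-- pv_equiv track=rewrite | github.com/zlr930/MCM-Model-Learning | 遗传算法求AGV订单分配.py | get_agv_task_lists
-- ===== SOURCE A (Python) =====
-- def get_agv_task_lists(chromosome):
--     agv_tasks = {}
--     for task_id, agv_id in enumerate(chromosome):
--         # 确保 agv_id 转换为整数，以免出现类型错误
--         agv_id = int(agv_id)  # 这里 agv_id 已经是整数，这一步实际上是多余的，但为了清晰说明问题保留
--         if agv_id not in agv_tasks:
--             agv_tasks[agv_id] = []
--         agv_tasks[agv_id].append(task_id)
--
--     # 将所有AGV的任务列表组织到一个大列表中
--     all_agv_tasks = list(agv_tasks.values())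
--
--     return all_agv_tasks
-- ===== SOURCE B (Python) =====
-- def get_agv_task_lists(chromosome):
--     # distinct AGV ids in first-appearance order, then one filtering scan per id
--     keys = list(dict.fromkeys(int(a) for a in chromosome))
--     return [[task_id for task_id, agv_id in enumerate(chromosome) if int(agv_id) == key]
--             for key in keys]
-- ===== Notes on version B (the rewrite author's own statement) =====
-- stated objective: alternative
-- what changed: Replaces the incremental dict-of-lists grouping loop with a distinct-keys pass (dict.fromkeys) followed by one filtering scan of the chromosome per key.
import Mathlib
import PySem

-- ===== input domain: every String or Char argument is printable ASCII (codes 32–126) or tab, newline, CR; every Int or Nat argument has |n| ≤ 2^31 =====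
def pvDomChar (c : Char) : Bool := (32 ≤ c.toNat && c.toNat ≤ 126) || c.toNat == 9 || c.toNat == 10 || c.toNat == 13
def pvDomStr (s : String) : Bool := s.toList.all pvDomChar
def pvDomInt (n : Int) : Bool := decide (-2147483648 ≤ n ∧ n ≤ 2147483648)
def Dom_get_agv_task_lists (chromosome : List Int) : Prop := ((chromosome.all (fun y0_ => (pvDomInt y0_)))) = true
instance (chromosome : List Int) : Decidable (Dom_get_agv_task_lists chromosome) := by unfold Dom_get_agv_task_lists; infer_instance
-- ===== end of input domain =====

-- B groups by first scanning the distinct ids (dict.fromkeys) and then filtering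
-- the chromosome once per id, instead of A's single incremental dict-of-lists loop
-- (alternative decomposition, same results).

-- ===== PORT A =====
-- grouping loop: if id unseen, insert []; then append the task index (list.append)
def get_agv_task_lists (chromosome : List Int) : List (List Int) :=
  let agv_tasks : PySem.Dict Int (List Int) :=
    (PySem.List.enumerate chromosome 0).foldl
      (fun d p =>
        let d := if d.contains p.2 then d else d.insert p.2 []
        d.modify p.2 [] (fun l => l ++ [p.1]))
      PySem.Dict.empty
  agv_tasks.values

-- ===== PORT B =====
def get_agv_task_lists_alt (chromosome : List Int) : List (List Int) :=
  let keys := PySem.List.dedup chromosome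
  keys.map (fun key =>
    ((PySem.List.enumerate chromosome 0).filter (fun p => p.2 == key)).map (·.1))

-- ===== PRECONDITION & SPEC =====
def Spec_get_agv_task_lists (chromosome : List Int) (out : List (List Int)) : Prop := out = get_agv_task_lists_alt chromosome
instance (chromosome : List Int) (out : List (List Int)) : Decidable (Spec_get_agv_task_lists chromosome out) := by unfold Spec_get_agv_task_lists; infer_instance

-- ===== CLAIM (what is proved, stated in full; the proofs are below) =====
def Claim_equal_get_agv_task_lists : Prop := ∀ (chromosome : List Int), Dom_get_agv_task_lists chromosome → Spec_get_agv_task_lists chromosome (get_agv_task_lists chromosome)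

-- ===== LEMMAS AND PROOFS =====

-- A's loop body equals a single modify (insert [] then append = modify with default [])
theorem stepA_eq_modify (d : PySem.Dict Int (List Int)) (p : Int × Int) :
    (let d := if d.contains p.2 then d else d.insert p.2 []
     d.modify p.2 [] (fun l => l ++ [p.1]))
    = d.modify p.2 [] (fun l => l ++ [p.1]) := by
  by_cases h : d.contains p.2 = true
  · simp [h]
  · simp only [Bool.not_eq_true] at h
    simp [h, PySem.Dict.modify, PySem.Dict.getD_insert_self,
      PySem.Dict.getD_of_not_contains d [] h, PySem.Dict.insert_insert_self]

theorem foldA_eq (ps : List (Int × Int)) (d : PySem.Dict Int (List Int)) :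
    ps.foldl
      (fun d p =>
        let d := if d.contains p.2 then d else d.insert p.2 []
        d.modify p.2 [] (fun l => l ++ [p.1])) d
    = (ps.map Prod.swap).foldl (fun d q => d.modify q.1 [] (fun l => l ++ [q.2])) d := by
  rw [List.foldl_map]
  exact PySem.List.foldl_congr_mem ps _ _ d (fun acc p _ => stepA_eq_modify acc p)

theorem get_agv_task_lists_spec : Claim_equal_get_agv_task_lists := by
  intro chromosome _
  unfold Spec_get_agv_task_lists get_agv_task_lists get_agv_task_lists_alt
  simp only [foldA_eq]
  set ps := (PySem.List.enumerate chromosome 0).map Prod.swap with hps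
  have hnd : (ps.foldl (fun d q => d.modify q.1 [] (fun l => l ++ [q.2]))
      (PySem.Dict.empty : PySem.Dict Int (List Int))).keys.Nodup := by
    have := PySem.Dict.nodup_keys_foldl_modify_key (κ := Int) ps (fun q => q.1)
      [] (fun _ q => fun l => l ++ [q.2]) PySem.Dict.empty (by simp)
    simpa using this
  rw [PySem.Dict.values_eq_map_keys _ hnd ([] : List Int)]
  have hkeys : (ps.foldl (fun d q => d.modify q.1 [] (fun l => l ++ [q.2]))
      (PySem.Dict.empty : PySem.Dict Int (List Int))).keys
      = PySem.List.dedup chromosome := by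
    have := PySem.Dict.keys_foldl_modify_key (κ := Int) ps (fun q => q.1)
      [] (fun _ q => fun l => l ++ [q.2]) PySem.Dict.empty
    simp only [this, PySem.Dict.keys_empty]
    have : ps.map (·.1) = chromosome := by
      simp [hps, List.map_map, Function.comp_def, Prod.swap,
        PySem.List.map_snd_enumerate]
    rw [this]
    simp [PySem.Set.update, PySem.Set.ofList_eq_foldl]
  rw [hkeys]
  apply List.map_congr_left
  intro k _
  rw [PySem.Dict.getD_foldl_modify_append]
  simp [hps, List.filter_map, List.map_map, Function.comp_def, Prod.swap,
    PySem.Dict.getD_empty]
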